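-- pv_equiv track=rewrite | github.com/ynput/OpenPype | openpype/client/server/conversion_utils.py | workfile_info_fields_v3_to_v4
-- ===== SOURCE A (Python) =====
-- def workfile_info_fields_v3_to_v4(fields):
--     if not fields:
--         return None
--
--     new_fields = set()
--     fields = set(fields)
--     for v3_key, v4_key in (
--         ("_id", "id"),
--         ("files", "path"),
--         ("filename", "name"),
--         ("data", "data"),
--     ):
--         if v3_key in fields:
--             new_fields.add(v4_key)
--
--     if "parent" in fields or "task_name" in fields:
--         new_fields.add("taskId")
--
--     return new_fields
-- ===== SOURCE B (Python) =====
-- def workfile_info_fields_v3_to_v4(fields):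
--     if not fields:
--         return None
--     # single pass over the input, accumulating presence flags; no field set, no table scan
--     has_id = has_files = has_filename = has_data = has_task = False
--     for f in fields:
--         if f == "_id":
--             has_id = True
--         elif f == "files":
--             has_files = True
--         elif f == "filename":
--             has_filename = True
--         elif f == "data":
--             has_data = True
--         elif f == "parent" or f == "task_name":
--             has_task = True
--     new_fields = set()
--     if has_id:
--         new_fields.add("id")
--     if has_files:
--         new_fields.add("path")
--     if has_filename:
--         new_fields.add("name")
--     if has_data:
--         new_fields.add("data")
--     if has_task:
--         new_fields.add("taskId")
--     return new_fields
-- ===== Notes on version B (the rewrite author's own statement) =====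
-- stated objective: alternative
-- what changed: A materialises set(fields) and scans a fixed key table with membership tests plus a separate parent/task_name OR-branch; B makes one pass over the raw input list accumulating five boolean presence flags (parent and task_name folded into one flag) and assembles the result set from the flags, with no field set and no table.
import Mathlib
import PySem

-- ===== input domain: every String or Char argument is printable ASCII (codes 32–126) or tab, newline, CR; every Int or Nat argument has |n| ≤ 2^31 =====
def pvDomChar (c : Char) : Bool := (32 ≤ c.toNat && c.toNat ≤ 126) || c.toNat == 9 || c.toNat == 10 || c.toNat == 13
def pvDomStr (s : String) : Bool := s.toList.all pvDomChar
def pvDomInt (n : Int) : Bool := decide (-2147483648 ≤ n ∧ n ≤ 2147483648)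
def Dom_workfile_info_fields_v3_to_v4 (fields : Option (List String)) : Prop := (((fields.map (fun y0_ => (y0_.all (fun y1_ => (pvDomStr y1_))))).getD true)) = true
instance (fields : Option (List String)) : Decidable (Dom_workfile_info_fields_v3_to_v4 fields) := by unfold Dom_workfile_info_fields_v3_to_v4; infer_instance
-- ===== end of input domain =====

-- B replaces A's set(fields)+table-scan+OR-branch by one pass over the raw input accumulating five presence flags, then assembles the set from the flags (alternative decomposition; return-value equivalence).
-- ===== PORT A =====
def workfile_info_fields_v3_to_v4 (fields : Option (List String)) : Option (List String) :=
  match fields with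
  | none => none
  | some fs =>
    if fs = [] then none
    else
      -- fields = set(fields); new_fields built by the four-pair loop, unrolled
      let fset : PySem.Set String := PySem.Set.ofList fs
      let nf : PySem.Set String := PySem.Set.empty
      let nf := if fset.contains "_id" then nf.add "id" else nf
      let nf := if fset.contains "files" then nf.add "path" else nf
      let nf := if fset.contains "filename" then nf.add "name" else nf
      let nf := if fset.contains "data" then nf.add "data" else nf
      let nf := if fset.contains "parent" || fset.contains "task_name" then nf.add "taskId" else nf
      some nf

-- ===== PORT B =====
-- the per-element flag update of B's single loop
def pvFlagStep (st : Bool × Bool × Bool × Bool × Bool) (f : String) : Bool × Bool × Bool × Bool × Bool :=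
  let (a, b, c, d, e) := st
  if f = "_id" then (true, b, c, d, e)
  else if f = "files" then (a, true, c, d, e)
  else if f = "filename" then (a, b, true, d, e)
  else if f = "data" then (a, b, c, true, e)
  else if f = "parent" || f = "task_name" then (a, b, c, d, true)
  else st

def workfile_info_fields_v3_to_v4_alt (fields : Option (List String)) : Option (List String) :=
  match fields with
  | none => none
  | some fs =>
    if fs = [] then none
    else
      let (hid, hfiles, hfilename, hdata, htask) :=
        fs.foldl pvFlagStep (false, false, false, false, false)
      let nf : PySem.Set String := PySem.Set.empty
      let nf := if hid then nf.add "id" else nf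
      let nf := if hfiles then nf.add "path" else nf
      let nf := if hfilename then nf.add "name" else nf
      let nf := if hdata then nf.add "data" else nf
      let nf := if htask then nf.add "taskId" else nf
      some nf

-- ===== PRECONDITION & SPEC =====
def Spec_workfile_info_fields_v3_to_v4 (fields : Option (List String)) (out : Option (List String)) : Prop := out = workfile_info_fields_v3_to_v4_alt fields
instance (fields : Option (List String)) (out : Option (List String)) : Decidable (Spec_workfile_info_fields_v3_to_v4 fields out) := by unfold Spec_workfile_info_fields_v3_to_v4; infer_instance

-- ===== CLAIM (what is proved, stated in full; the proofs are below) =====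
def Claim_equal_workfile_info_fields_v3_to_v4 : Prop := ∀ (fields : Option (List String)), Dom_workfile_info_fields_v3_to_v4 fields → Spec_workfile_info_fields_v3_to_v4 fields (workfile_info_fields_v3_to_v4 fields)

-- ===== LEMMAS AND PROOFS =====
-- B's flag fold computes exactly the five membership facts A's table scan tests.
theorem pvFlags_foldl (fs : List String) (st : Bool × Bool × Bool × Bool × Bool) :
    fs.foldl pvFlagStep st =
      (st.1 || fs.contains "_id",
       st.2.1 || fs.contains "files",
       st.2.2.1 || fs.contains "filename",
       st.2.2.2.1 || fs.contains "data",
       st.2.2.2.2 || fs.contains "parent" || fs.contains "task_name") := by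
  induction fs generalizing st with
  | nil => simp
  | cons x xs ih =>
    rw [List.foldl_cons, ih]
    obtain ⟨a, b, c, d, e⟩ := st
    by_cases h1 : x = "_id" <;> by_cases h2 : x = "files" <;>
    by_cases h3 : x = "filename" <;> by_cases h4 : x = "data" <;>
    by_cases h5 : x = "parent" <;> by_cases h6 : x = "task_name" <;>
    simp [pvFlagStep, h1, h2, h3, h4, h5, h6,
      Bool.or_assoc, Bool.or_left_comm] <;>
    try simp [Ne.symm h1, Ne.symm h2, Ne.symm h3, Ne.symm h4, Ne.symm h5, Ne.symm h6]

theorem pvSet_contains_ofList (fs : List String) (x : String) :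
    PySem.Set.contains (PySem.Set.ofList fs) x = fs.contains x := by
  simp only [PySem.Set.contains_eq_listContains]
  by_cases h : x ∈ fs <;>
    simp [PySem.Set.mem_ofList, h]

-- ===== VERDICT (by name: the statement is the Claim_ definition above) =====
theorem workfile_info_fields_v3_to_v4_spec : Claim_equal_workfile_info_fields_v3_to_v4 := by
  intro fields _
  unfold Spec_workfile_info_fields_v3_to_v4
  match fields with
  | none => rfl
  | some fs =>
    by_cases hfs : fs = []
    · simp [workfile_info_fields_v3_to_v4, workfile_info_fields_v3_to_v4_alt, hfs]
    · simp only [workfile_info_fields_v3_to_v4, workfile_info_fields_v3_to_v4_alt, hfs,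
        if_false, pvFlags_foldl, pvSet_contains_ofList, Bool.false_or]
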